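-- pv_equiv track=rewrite | github.com/erinseepersad/assignment-7-8-9-10 | seepersadErin_assign7_part1.py | string_capitalize
-- ===== SOURCE A (Python) =====
-- def string_capitalize(x):
--     newstring = ""
--     previous_character = " "
--     for i in x:
--         table=ord(i)
--         if previous_character == " ":
--             if table>96:
--                 newstring += chr(table - 32)
--             else:
--                 newstring+=i
--         else:
--             if table>=65 and table<=90:#range for all the capital letters
--                 newstring+= chr(table+32)
--             else:# everything that doesnt fall into this we dont change
--                 newstring+=i
--         previous_character = i
--     return newstring
-- ===== SOURCE B (Python) =====
-- def string_capitalize(x):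
--     def first(c):
--         t = ord(c)
--         return chr(t - 32) if t > 96 else c
--
--     def rest(c):
--         t = ord(c)
--         return chr(t + 32) if 65 <= t <= 90 else c
--
--     return ' '.join(
--         first(t[0]) + ''.join(rest(c) for c in t[1:]) if t else ''
--         for t in x.split(' ')
--     )
-- ===== Notes on version B (the rewrite author's own statement) =====
-- stated objective: idiomatic
-- what changed: Replaces A's single accumulator loop carrying a previous_character state with a split-on-space / transform-each-token / join decomposition (word-start rule on the token's first char, lowercase rule on the rest).
import Mathlib
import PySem

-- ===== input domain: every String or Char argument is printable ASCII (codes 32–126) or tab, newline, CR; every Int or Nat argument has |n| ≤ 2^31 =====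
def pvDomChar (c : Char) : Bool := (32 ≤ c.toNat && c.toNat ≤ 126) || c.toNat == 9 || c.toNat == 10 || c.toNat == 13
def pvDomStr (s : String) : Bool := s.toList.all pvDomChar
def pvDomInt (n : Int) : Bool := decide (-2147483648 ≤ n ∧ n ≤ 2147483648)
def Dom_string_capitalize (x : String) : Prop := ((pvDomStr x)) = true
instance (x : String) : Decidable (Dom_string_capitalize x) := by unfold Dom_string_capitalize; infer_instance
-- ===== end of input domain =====

-- B replaces A's running previous-character state machine with a split-on-space /
-- transform-each-token / join decomposition (idiomatic; same cost, no speed claim).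

-- ===== PORT A =====
-- loop body of A's for-loop; state = (newstring as char list, previous_character)
def pvStepA (st : List Char × Char) (i : Char) : List Char × Char :=
  let table := i.toNat
  if st.2 = ' ' then
    if 96 < table then (st.1 ++ [Char.ofNat (table - 32)], i)
    else (st.1 ++ [i], i)
  else
    if 65 ≤ table ∧ table ≤ 90 then (st.1 ++ [Char.ofNat (table + 32)], i)
    else (st.1 ++ [i], i)

def string_capitalize (x : String) : String :=
  String.mk ((x.toList.foldl pvStepA ([], ' ')).1)

-- ===== PORT B =====
-- Source B's `first`: word-start rule
def pvFirst (c : Char) : Char :=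
  if 96 < c.toNat then Char.ofNat (c.toNat - 32) else c

-- Source B's `rest`: lowercase rule for non-initial characters
def pvRest (c : Char) : Char :=
  if 65 ≤ c.toNat ∧ c.toNat ≤ 90 then Char.ofNat (c.toNat + 32) else c

-- Source B's per-token transform: `first(t[0]) + ''.join(rest(c) for c in t[1:]) if t else ''`
def pvTok (t : List Char) : List Char :=
  match t with
  | [] => []
  | c :: cs => pvFirst c :: cs.map pvRest

def string_capitalize_alt (x : String) : String :=
  String.mk (PySem.Chars.join [' '] ((PySem.Chars.splitOn x.toList [' ']).map pvTok))

-- ===== PRECONDITION & SPEC =====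
def Spec_string_capitalize (x : String) (out : String) : Prop := out = string_capitalize_alt x
instance (x : String) (out : String) : Decidable (Spec_string_capitalize x out) := by unfold Spec_string_capitalize; infer_instance

-- ===== CLAIM (what is proved, stated in full; the proofs are below) =====
def Claim_equal_string_capitalize : Prop := ∀ (x : String), Dom_string_capitalize x → Spec_string_capitalize x (string_capitalize x)

-- ===== LEMMAS AND PROOFS =====

-- clean recursive characterisation of splitting on a single literal space
def pvSplit1 : List Char → List (List Char)
  | [] => [[]]
  | c :: cs => if c = ' ' then [] :: pvSplit1 cs else (pvSplit1 cs).modifyHead (c :: ·)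

theorem pvSplit1_ne_nil (cs : List Char) : pvSplit1 cs ≠ [] := by
  induction cs with
  | nil => simp [pvSplit1]
  | cons c cs ih =>
    simp only [pvSplit1]
    split
    · simp
    · cases h : pvSplit1 cs with
      | nil => exact absurd h ih
      | cons t ts => simp [List.modifyHead]

theorem pvGo_eq : ∀ (l : List Char) (fuel : Nat), l.length ≤ fuel →
    ∀ (cur : List Char) (acc : List (List Char)),
    PySem.Chars.splitOn.go [' '] fuel l cur acc
      = acc.reverse ++ (pvSplit1 l).modifyHead (cur.reverse ++ ·) := by
  intro l
  induction l with
  | nil =>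
    intro fuel _ cur acc
    cases fuel <;> simp [PySem.Chars.splitOn.go, pvSplit1]
  | cons c rest ih =>
    intro fuel hf cur acc
    cases fuel with
    | zero => simp at hf
    | succ f =>
      rw [PySem.Chars.splitOn.go]
      by_cases hc : c = ' '
      · have hpre : [' '].isPrefixOf (c :: rest) = true := by simp [List.isPrefixOf, hc]
        rw [if_pos hpre]
        simp only [List.length_cons, List.length_nil, List.drop_succ_cons, List.drop_zero] at *
        rw [ih f (by omega) [] (cur.reverse :: acc)]
        cases h : pvSplit1 rest with
        | nil => exact absurd h (pvSplit1_ne_nil rest)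
        | cons t ts => simp [pvSplit1, hc, h, List.modifyHead]
      · have hpre : [' '].isPrefixOf (c :: rest) = false := by
          simp [List.isPrefixOf]; exact fun h => hc h.symm
        rw [if_neg (by simp [hpre])]
        simp only [List.length_cons] at hf
        rw [ih f (by omega) (c :: cur) acc]
        simp only [pvSplit1, if_neg hc, List.modifyHead_modifyHead]
        have hfun : (fun t => (c :: cur).reverse ++ t)
            = ((fun t => cur.reverse ++ t) ∘ (fun t => c :: t)) := by
          funext t; simp
        rw [hfun]

theorem splitOn_eq_pvSplit1 (cs : List Char) :
    PySem.Chars.splitOn cs [' '] = pvSplit1 cs := by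
  unfold PySem.Chars.splitOn
  rw [pvGo_eq cs (cs.length + 1) (by omega) [] []]
  cases h : pvSplit1 cs with
  | nil => exact absurd h (pvSplit1_ne_nil cs)
  | cons t ts => simp [List.modifyHead]

-- A's loop, as a stateless recursion on the flag "previous character was a space"
def pvRun : List Char → Bool → List Char
  | [], _ => []
  | c :: cs, b => (if b then pvFirst c else pvRest c) :: pvRun cs (decide (c = ' '))

theorem foldA_eq : ∀ (cs : List Char) (acc : List Char) (p : Char),
    (cs.foldl pvStepA (acc, p)).1 = acc ++ pvRun cs (decide (p = ' ')) := by
  intro cs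
  induction cs with
  | nil => intro acc p; simp [pvRun]
  | cons c cs ih =>
    intro acc p
    simp only [List.foldl_cons]
    by_cases hp : p = ' '
    · simp only [pvStepA, if_pos hp]
      by_cases h96 : 96 < c.toNat
      · rw [if_pos h96, ih]; simp [pvRun, hp, pvFirst, if_pos h96]
      · rw [if_neg h96, ih]; simp [pvRun, hp, pvFirst, if_neg h96]
    · simp only [pvStepA, if_neg hp]
      by_cases hAZ : 65 ≤ c.toNat ∧ c.toNat ≤ 90
      · rw [if_pos hAZ, ih]; simp [pvRun, hp, pvRest, if_pos hAZ]
      · rw [if_neg hAZ, ih]; simp [pvRun, hp, pvRest, if_neg hAZ]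

theorem join_cons_head (sep : List Char) (x : Char) (a : List Char) (rest : List (List Char)) :
    PySem.Chars.join sep ((x :: a) :: rest) = x :: PySem.Chars.join sep (a :: rest) := by
  cases rest with
  | nil => rw [PySem.Chars.join_singleton, PySem.Chars.join_singleton]
  | cons b l =>
    rw [PySem.Chars.join_cons_cons, PySem.Chars.join_cons_cons]
    simp

theorem run_join (cs : List Char) :
    (PySem.Chars.join [' '] ((pvSplit1 cs).map pvTok) = pvRun cs true)
    ∧ (∀ t ts, pvSplit1 cs = t :: ts →
        PySem.Chars.join [' '] (t.map pvRest :: ts.map pvTok) = pvRun cs false) := by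
  induction cs with
  | nil =>
    constructor
    · simp [pvSplit1, pvTok, PySem.Chars.join_singleton, pvRun]
    · intro t ts h
      simp only [pvSplit1, List.cons.injEq] at h
      obtain ⟨rfl, rfl⟩ := h
      simp [PySem.Chars.join_singleton, pvRun]
  | cons c cs ih =>
    obtain ⟨t, ts, ht⟩ : ∃ t ts, pvSplit1 cs = t :: ts := by
      cases h : pvSplit1 cs with
      | nil => exact absurd h (pvSplit1_ne_nil cs)
      | cons a b => exact ⟨a, b, rfl⟩
    have h1 := ih.1
    rw [ht, List.map_cons] at h1
    by_cases hc : c = ' '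
    · subst hc
      have hs : pvSplit1 (' ' :: cs) = [] :: t :: ts := by simp [pvSplit1, ht]
      have hsp1 : pvFirst ' ' = ' ' := by decide
      have hsp2 : pvRest ' ' = ' ' := by decide
      constructor
      · rw [hs, List.map_cons, List.map_cons, PySem.Chars.join_cons_cons, h1]
        simp [pvTok, pvRun, hsp1]
      · intro t' ts' h
        rw [hs, List.cons.injEq] at h
        obtain ⟨rfl, rfl⟩ := h
        simp only [List.map_nil, List.map_cons]
        rw [PySem.Chars.join_cons_cons, h1]
        simp [pvRun, hsp2]
    · have hs : pvSplit1 (c :: cs) = (c :: t) :: ts := by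
        simp [pvSplit1, hc, ht, List.modifyHead]
      constructor
      · rw [hs, List.map_cons]
        rw [show pvTok (c :: t) = pvFirst c :: t.map pvRest from rfl]
        rw [join_cons_head, ih.2 t ts ht]
        simp [pvRun, hc]
      · intro t' ts' h
        rw [hs, List.cons.injEq] at h
        obtain ⟨rfl, rfl⟩ := h
        rw [List.map_cons, join_cons_head, ih.2 t ts ht]
        simp [pvRun, hc]

-- ===== VERDICT (by name: the statement is the Claim_ definition above) =====
theorem string_capitalize_spec : Claim_equal_string_capitalize := by
  intro x _
  unfold Spec_string_capitalize string_capitalize string_capitalize_alt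
  rw [foldA_eq, splitOn_eq_pvSplit1]
  simp [(run_join x.toList).1]
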